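-- pv_equiv track=rewrite | github.com/jiwan1721/hacker-rank-python | compareResults.py | miniMaxSum
-- ===== SOURCE A (Python) =====
-- from copy import deepcopy
--
-- def miniMaxSum(arr):
--     all_sum=[]
--     for index in range(len(arr)):
--         x = deepcopy(arr)
--         x.pop(index)
--         all_sum.append(sum(x))
--     max_num = max(all_sum)
--     min_num = min(all_sum)
--     return min_num,max_num
-- ===== SOURCE B (Python) =====
-- def miniMaxSum(arr):
--     total = sum(arr)
--     return total - max(arr), total - min(arr)
-- ===== Notes on version B (the rewrite author's own statement) =====
-- stated objective: faster
-- what changed: replaced the O(n^2) loop that copies the list and re-sums it for every popped index by one pass: total sum minus max gives the min sum, total minus min gives the max sum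
import Mathlib
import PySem

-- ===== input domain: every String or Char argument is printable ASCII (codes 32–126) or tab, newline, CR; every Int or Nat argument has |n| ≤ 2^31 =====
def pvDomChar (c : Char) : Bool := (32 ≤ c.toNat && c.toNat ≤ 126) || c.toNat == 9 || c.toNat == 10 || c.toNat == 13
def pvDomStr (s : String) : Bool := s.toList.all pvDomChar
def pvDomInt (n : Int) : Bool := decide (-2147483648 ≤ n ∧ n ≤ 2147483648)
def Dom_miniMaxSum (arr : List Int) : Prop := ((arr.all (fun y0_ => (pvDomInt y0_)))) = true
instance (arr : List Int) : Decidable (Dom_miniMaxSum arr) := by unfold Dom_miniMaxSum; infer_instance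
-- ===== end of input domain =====

-- B computes both answers in one pass: total sum minus max = min sum, total minus min = max sum (A re-copies and re-sums for every index).


-- ===== PORT A =====
def miniMaxSum (arr : List Int) : Int × Int :=
  let all_sum := (PySem.List.pyRange 0 arr.length 1).foldl
    (fun acc index =>
      match PySem.List.pop? arr index with
      | some (_, x) => acc ++ [x.sum]
      | none => acc) ([] : List Int)
  match PySem.List.max? all_sum (fun y => y), PySem.List.min? all_sum (fun y => y) with
  | some max_num, some min_num => (min_num, max_num)
  | _, _ => (0, 0)   -- unreachable under Pre_ (arr nonempty); Python raises ValueError on []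

-- ===== PORT B =====
def miniMaxSum_alt (arr : List Int) : Int × Int :=
  let total := arr.sum
  match PySem.List.max? arr (fun y => y) with
  | none => (0, 0)   -- unreachable under Pre_ (arr nonempty); Python raises ValueError on []
  | some mx =>
    match PySem.List.min? arr (fun y => y) with
    | none => (0, 0)
    | some mn => (total - mx, total - mn)

-- ===== PRECONDITION & SPEC =====
-- Pre_ excludes only the empty list, on which both A and B raise ValueError (max of empty sequence).
def Pre_miniMaxSum (arr : List Int) : Prop := arr ≠ []
instance (arr : List Int) : Decidable (Pre_miniMaxSum arr) := by unfold Pre_miniMaxSum; infer_instance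
def pvWitness_miniMaxSum : List Int := [1, 2, 3, 4, 5]

def Spec_miniMaxSum (arr : List Int) (out : Int × Int) : Prop := out = miniMaxSum_alt arr
instance (arr : List Int) (out : Int × Int) : Decidable (Spec_miniMaxSum arr out) := by unfold Spec_miniMaxSum; infer_instance

-- ===== CLAIM (what is proved, stated in full; the proofs are below) =====
def Claim_equal_miniMaxSum : Prop := ∀ (arr : List Int), Dom_miniMaxSum arr → Pre_miniMaxSum arr → Spec_miniMaxSum arr (miniMaxSum arr)

-- ===== LEMMAS AND PROOFS =====

-- sum of the list with the k-th element removed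
lemma pv_sum_eraseIdx (xs : List Int) : ∀ (k : Nat), (h : k < xs.length) →
    (xs.eraseIdx k).sum = xs.sum - xs[k] := by
  induction xs with
  | nil => intro k h; simp at h
  | cons a t ih =>
    intro k h
    cases k with
    | zero => simp
    | succ n =>
      simp only [List.eraseIdx_cons_succ, List.sum_cons, List.getElem_cons_succ]
      have := ih n (by simpa using h)
      omega

-- A's loop builds exactly the list of "total minus element", left to right
lemma pv_allsum (xs : List Int) : ∀ (n : Nat), n ≤ xs.length →
    (List.range n).foldl
      (fun acc (k : Nat) => match PySem.List.pop? xs (0 + (k : Int)) with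
        | some (_, x) => acc ++ [x.sum]
        | none => acc) ([] : List Int)
    = (xs.take n).map (fun a => xs.sum - a) := by
  intro n
  induction n with
  | zero => intro _; simp
  | succ m ih =>
    intro h
    have hm : m < xs.length := by omega
    rw [List.range_succ, List.foldl_append, ih (by omega)]
    have hpop : PySem.List.pop? xs (0 + (m : Int)) = some (xs[m], xs.eraseIdx m) := by
      simpa using PySem.List.pop?_natCast xs m hm
    simp only [List.foldl, hpop]
    rw [pv_sum_eraseIdx xs m hm,
        show List.take (m + 1) xs = List.take m xs ++ [xs[m]] by
          rw [List.take_add_one, List.getElem?_eq_getElem hm]; rfl,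
        List.map_append]
    rfl

lemma pv_foldl_min_map (S : Int) (t : List Int) : ∀ (x : Int),
    (t.map (fun a => S - a)).foldl min (S - x) = S - t.foldl max x := by
  induction t with
  | nil => intro x; simp
  | cons a r ih =>
    intro x
    simp only [List.map_cons, List.foldl_cons]
    rw [show min (S - x) (S - a) = S - max x a by omega]
    exact ih (max x a)

lemma pv_foldl_max_map (S : Int) (t : List Int) : ∀ (x : Int),
    (t.map (fun a => S - a)).foldl max (S - x) = S - t.foldl min x := by
  induction t with
  | nil => intro x; simp
  | cons a r ih =>
    intro x
    simp only [List.map_cons, List.foldl_cons]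
    rw [show max (S - x) (S - a) = S - min x a by omega]
    exact ih (min x a)

-- ===== VERDICT (by name: the statement is the Claim_ definition above) =====
theorem miniMaxSum_spec : Claim_equal_miniMaxSum := by
  intro arr _ hpre
  cases arr with
  | nil => exact absurd rfl hpre
  | cons h t =>
    show miniMaxSum (h :: t) = miniMaxSum_alt (h :: t)
    unfold miniMaxSum miniMaxSum_alt
    have hall :
        (PySem.List.pyRange 0 ((h :: t).length : Int) 1).foldl
          (fun acc index => match PySem.List.pop? (h :: t) index with
            | some (_, x) => acc ++ [x.sum]
            | none => acc) ([] : List Int)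
        = (h :: t).map (fun a => (h :: t).sum - a) := by
      rw [PySem.List.pyRange_one, List.foldl_map]
      have h1 := pv_allsum (h :: t) (h :: t).length (le_refl _)
      have h2 : ((((h :: t).length : Int) - 0).toNat) = (h :: t).length := by simp
      rw [h2]
      simpa using h1
    rw [hall]
    simp only [List.map_cons]
    rw [PySem.List.max?_id_cons, PySem.List.min?_id_cons,
        PySem.List.max?_id_cons, PySem.List.min?_id_cons]
    simp only
    rw [pv_foldl_min_map, pv_foldl_max_map]
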